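-- pv_equiv track=rewrite | github.com/ngngminhthai/SteelbarCounting | infer_image.py | generate_slices
-- ===== SOURCE A (Python) =====
-- def generate_slices(image_w, image_h, slice_size, overlap):
--     """Yield unique (x0, y0, x1, y1) tiles covering the full image."""
--     stride = slice_size - overlap
--     xs = list(range(0, image_w, stride))
--     ys = list(range(0, image_h, stride))
--     seen = set()
--
--     for y0 in ys:
--         for x0 in xs:
--             cur_x0 = x0
--             cur_y0 = y0
--             x1 = min(cur_x0 + slice_size, image_w)
--             y1 = min(cur_y0 + slice_size, image_h)
--
--             # Shift edge tiles back so every tile keeps the target size.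
--             cur_x0 = max(0, x1 - slice_size)
--             cur_y0 = max(0, y1 - slice_size)
--             tile = (cur_x0, cur_y0, x1, y1)
--
--             if tile in seen:
--                 continue
--             seen.add(tile)
--             yield tile
-- ===== SOURCE B (Python) =====
-- def generate_slices(image_w, image_h, slice_size, overlap):
--     """Yield unique (x0, y0, x1, y1) tiles covering the full image.
--
--     Per-axis decomposition: the x-interval depends only on x0 and the
--     y-interval only on y0, so deduplicate each axis once (order-preserving
--     via dict.fromkeys) and yield the cross product.
--     """
--     stride = slice_size - overlap
--     xps = list(dict.fromkeys(
--         (max(0, min(x0 + slice_size, image_w) - slice_size),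
--          min(x0 + slice_size, image_w))
--         for x0 in range(0, image_w, stride)))
--     yps = list(dict.fromkeys(
--         (max(0, min(y0 + slice_size, image_h) - slice_size),
--          min(y0 + slice_size, image_h))
--         for y0 in range(0, image_h, stride)))
--     for cy, y1 in yps:
--         for cx, x1 in xps:
--             yield (cx, cy, x1, y1)
-- ===== Notes on version B (the rewrite author's own statement) =====
-- stated objective: alternative
-- what changed: Replaces the full-tuple seen-set dedup over the nested tile loop by per-axis deduplication (dict.fromkeys on the x-intervals and y-intervals separately) followed by a plain cross product, exploiting that each tile is the pairing of an x-only and a y-only interval.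
import Mathlib
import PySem

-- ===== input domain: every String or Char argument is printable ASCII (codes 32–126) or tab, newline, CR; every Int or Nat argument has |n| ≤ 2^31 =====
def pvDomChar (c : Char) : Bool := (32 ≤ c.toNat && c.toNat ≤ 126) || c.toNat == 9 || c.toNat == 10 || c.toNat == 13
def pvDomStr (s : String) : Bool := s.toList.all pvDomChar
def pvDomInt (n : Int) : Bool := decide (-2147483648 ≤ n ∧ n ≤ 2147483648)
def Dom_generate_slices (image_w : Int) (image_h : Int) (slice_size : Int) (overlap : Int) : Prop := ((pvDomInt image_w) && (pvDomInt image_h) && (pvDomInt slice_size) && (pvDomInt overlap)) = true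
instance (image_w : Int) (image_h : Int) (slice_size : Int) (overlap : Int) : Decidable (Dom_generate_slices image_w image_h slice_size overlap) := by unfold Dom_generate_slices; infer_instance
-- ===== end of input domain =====

-- B replaces A's full-tuple seen-set dedup over the nested loop by per-axis
-- deduplication of the x- and y-intervals followed by a cross product (alternative decomposition).

-- ===== PORT A =====
def generate_slices (image_w : Int) (image_h : Int) (slice_size : Int) (overlap : Int) : List (Int × Int × Int × Int) :=
  let stride := slice_size - overlap
  let xs := PySem.List.pyRange 0 image_w stride
  let ys := PySem.List.pyRange 0 image_h stride
  let final := ys.foldl (fun acc y0 =>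
    xs.foldl (fun acc x0 =>
      let cur_x0 := x0
      let cur_y0 := y0
      let x1 := min (cur_x0 + slice_size) image_w
      let y1 := min (cur_y0 + slice_size) image_h
      let cur_x0 := max 0 (x1 - slice_size)
      let cur_y0 := max 0 (y1 - slice_size)
      let tile : Int × Int × Int × Int := (cur_x0, cur_y0, x1, y1)
      if PySem.Set.contains acc.1 tile then acc
      else (PySem.Set.add acc.1 tile, acc.2 ++ [tile])) acc)
    ((PySem.Set.empty : PySem.Set (Int × Int × Int × Int)), ([] : List (Int × Int × Int × Int)))
  final.2

-- ===== PORT B =====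
def generate_slices_alt (image_w : Int) (image_h : Int) (slice_size : Int) (overlap : Int) : List (Int × Int × Int × Int) :=
  let stride := slice_size - overlap
  let xps := PySem.List.dedup ((PySem.List.pyRange 0 image_w stride).map (fun x0 =>
    (max 0 (min (x0 + slice_size) image_w - slice_size), min (x0 + slice_size) image_w)))
  let yps := PySem.List.dedup ((PySem.List.pyRange 0 image_h stride).map (fun y0 =>
    (max 0 (min (y0 + slice_size) image_h - slice_size), min (y0 + slice_size) image_h)))
  yps.flatMap (fun yp => xps.map (fun xp => (xp.1, yp.1, xp.2, yp.2)))

-- ===== PRECONDITION & SPEC =====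
-- Pre_ excludes exactly stride = 0 (slice_size = overlap), where Python's range raises ValueError.
def Pre_generate_slices (image_w : Int) (image_h : Int) (slice_size : Int) (overlap : Int) : Prop := slice_size ≠ overlap
instance (image_w : Int) (image_h : Int) (slice_size : Int) (overlap : Int) : Decidable (Pre_generate_slices image_w image_h slice_size overlap) := by unfold Pre_generate_slices; infer_instance
def pvWitness_generate_slices : Int × Int × Int × Int := (5, 5, 3, 1)

def Spec_generate_slices (image_w : Int) (image_h : Int) (slice_size : Int) (overlap : Int) (out : List (Int × Int × Int × Int)) : Prop := out = generate_slices_alt image_w image_h slice_size overlap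
instance (image_w : Int) (image_h : Int) (slice_size : Int) (overlap : Int) (out : List (Int × Int × Int × Int)) : Decidable (Spec_generate_slices image_w image_h slice_size overlap out) := by unfold Spec_generate_slices; infer_instance

-- ===== CLAIM (what is proved, stated in full; the proofs are below) =====
def Claim_equal_generate_slices : Prop := ∀ (image_w : Int) (image_h : Int) (slice_size : Int) (overlap : Int), Dom_generate_slices image_w image_h slice_size overlap → Pre_generate_slices image_w image_h slice_size overlap → Spec_generate_slices image_w image_h slice_size overlap (generate_slices image_w image_h slice_size overlap)

-- ===== LEMMAS AND PROOFS =====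

-- The interleaved tile constructor: tile = (cx, cy, x1, y1) from xp = (cx, x1), yp = (cy, y1).
def mkT (yp xp : Int × Int) : Int × Int × Int × Int := (xp.1, yp.1, xp.2, yp.2)

theorem mkT_inj {yp xp yp' xp' : Int × Int} (h : mkT yp xp = mkT yp' xp') : yp = yp' ∧ xp = xp' := by
  obtain ⟨a, b⟩ := yp; obtain ⟨c, d⟩ := xp; obtain ⟨a', b'⟩ := yp'; obtain ⟨c', d'⟩ := xp'
  simp [mkT, Prod.ext_iff] at h ⊢
  omega

-- One step of A's inner loop, abstracted over the tile constructor arguments.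
def stepT (yp : Int × Int) (acc : PySem.Set (Int × Int × Int × Int) × List (Int × Int × Int × Int))
    (xp : Int × Int) : PySem.Set (Int × Int × Int × Int) × List (Int × Int × Int × Int) :=
  if PySem.Set.contains acc.1 (mkT yp xp) then acc
  else (PySem.Set.add acc.1 (mkT yp xp), acc.2 ++ [mkT yp xp])

-- A row whose tiles are all already seen changes nothing.
theorem stale_row (yp : Int × Int) :
    ∀ (X : List (Int × Int)) (acc : PySem.Set (Int × Int × Int × Int) × List (Int × Int × Int × Int)),
    (∀ xp ∈ X, mkT yp xp ∈ acc.1) → X.foldl (stepT yp) acc = acc := by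
  intro X
  induction X with
  | nil => intro acc _; rfl
  | cons xp X ih =>
    intro acc h
    have hm : mkT yp xp ∈ acc.1 := h xp (List.mem_cons_self ..)
    have : stepT yp acc xp = acc := by
      unfold stepT
      rw [if_pos ((PySem.Set.contains_iff _ _).mpr hm)]
    rw [List.foldl_cons, this]
    exact ih acc (fun q hq => h q (List.mem_cons_of_mem _ hq))

-- A row none of whose tiles occur in `base`: the inner loop performs exactly a
-- per-x dedup, appending the images under (mkT yp) of the new x-intervals.
theorem fresh_row (yp : Int × Int) (base out0 : List (Int × Int × Int × Int))
    (hb : ∀ xp : Int × Int, mkT yp xp ∉ base) :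
    ∀ (X row : List (Int × Int)),
    X.foldl (stepT yp) (base ++ row.map (mkT yp), out0 ++ row.map (mkT yp))
      = (base ++ (X.foldl PySem.Set.add row).map (mkT yp),
         out0 ++ (X.foldl PySem.Set.add row).map (mkT yp)) := by
  intro X
  induction X with
  | nil => intro row; rfl
  | cons xp X ih =>
    intro row
    rw [List.foldl_cons, List.foldl_cons]
    by_cases hmem : xp ∈ row
    · have hc : mkT yp xp ∈ base ++ row.map (mkT yp) := by
        exact List.mem_append_right _ (List.mem_map_of_mem hmem)
      have hstep : stepT yp (base ++ row.map (mkT yp), out0 ++ row.map (mkT yp)) xp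
          = (base ++ row.map (mkT yp), out0 ++ row.map (mkT yp)) := by
        unfold stepT
        rw [if_pos ((PySem.Set.contains_iff _ _).mpr hc)]
      rw [hstep, PySem.Set.add_of_mem hmem]
      exact ih row
    · have hc : mkT yp xp ∉ base ++ row.map (mkT yp) := by
        intro hmm
        rcases List.mem_append.mp hmm with h1 | h1
        · exact hb xp h1
        · rcases List.mem_map.mp h1 with ⟨q, hq, he⟩
          exact hmem ((mkT_inj he).2 ▸ hq)
      have hstep : stepT yp (base ++ row.map (mkT yp), out0 ++ row.map (mkT yp)) xp
          = (base ++ (row ++ [xp]).map (mkT yp), out0 ++ (row ++ [xp]).map (mkT yp)) := by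
        unfold stepT
        rw [if_neg (fun hcon => hc ((PySem.Set.contains_iff _ _).mp hcon))]
        rw [PySem.Set.add_of_not_mem hc]
        simp
      rw [hstep, PySem.Set.add_of_not_mem hmem]
      exact ih (row ++ [xp])

-- The whole nested loop: with rows indexed by already-collected y-intervals P,
-- processing Y extends P by dedup and the output is the cross product.
theorem outer_loop (X0 : List (Int × Int)) :
    ∀ (Y P : List (Int × Int)),
    Y.foldl (fun acc yp => X0.foldl (stepT yp) acc)
      (P.flatMap (fun yp => (PySem.Set.ofList X0).map (mkT yp)),
       P.flatMap (fun yp => (PySem.Set.ofList X0).map (mkT yp)))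
      = ((Y.foldl PySem.Set.add P).flatMap (fun yp => (PySem.Set.ofList X0).map (mkT yp)),
         (Y.foldl PySem.Set.add P).flatMap (fun yp => (PySem.Set.ofList X0).map (mkT yp))) := by
  intro Y
  induction Y with
  | nil => intro P; rfl
  | cons yp Y ih =>
    intro P
    rw [List.foldl_cons, List.foldl_cons]
    by_cases hmem : yp ∈ P
    · have hrow : X0.foldl (stepT yp)
          (P.flatMap (fun yp => (PySem.Set.ofList X0).map (mkT yp)),
           P.flatMap (fun yp => (PySem.Set.ofList X0).map (mkT yp)))
          = (P.flatMap (fun yp => (PySem.Set.ofList X0).map (mkT yp)),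
             P.flatMap (fun yp => (PySem.Set.ofList X0).map (mkT yp))) := by
        apply stale_row
        intro xp hxp
        exact List.mem_flatMap.mpr ⟨yp, hmem,
          List.mem_map_of_mem ((PySem.Set.mem_ofList _ _).mpr hxp)⟩
      rw [hrow, PySem.Set.add_of_mem hmem]
      exact ih P
    · have hb : ∀ xp : Int × Int, mkT yp xp ∉ P.flatMap (fun yp => (PySem.Set.ofList X0).map (mkT yp)) := by
        intro xp hmm
        rcases List.mem_flatMap.mp hmm with ⟨yp', hyp', hmem'⟩
        rcases List.mem_map.mp hmem' with ⟨xp', _, he⟩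
        exact hmem ((mkT_inj he).1 ▸ hyp')
      have hrow := fresh_row yp
        (P.flatMap (fun yp => (PySem.Set.ofList X0).map (mkT yp)))
        (P.flatMap (fun yp => (PySem.Set.ofList X0).map (mkT yp))) hb X0 []
      simp only [List.map_nil, List.append_nil] at hrow
      have hofl : X0.foldl PySem.Set.add ([] : PySem.Set (Int × Int)) = PySem.Set.ofList X0 :=
        (PySem.Set.ofList_eq_foldl X0).symm
      rw [hofl] at hrow
      have hflat : (P.flatMap (fun yp => (PySem.Set.ofList X0).map (mkT yp))) ++ (PySem.Set.ofList X0).map (mkT yp)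
          = (P ++ [yp]).flatMap (fun yp => (PySem.Set.ofList X0).map (mkT yp)) := by
        simp
      rw [hrow, hflat, PySem.Set.add_of_not_mem hmem]
      exact ih (P ++ [yp])

-- A's port, with coordinates mapped to their per-axis intervals.
theorem genA_eq (w h s o : Int) :
    generate_slices w h s o
    = (((PySem.List.pyRange 0 h (s - o)).map (fun y0 => (max 0 (min (y0 + s) h - s), min (y0 + s) h))).foldl
        (fun acc yp =>
          ((PySem.List.pyRange 0 w (s - o)).map (fun x0 => (max 0 (min (x0 + s) w - s), min (x0 + s) w))).foldl
            (stepT yp) acc)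
        (([] : PySem.Set (Int × Int × Int × Int)), ([] : List (Int × Int × Int × Int)))).2 := by
  simp only [generate_slices, List.foldl_map]
  rfl

-- ===== VERDICT (by name: the statement is the Claim_ definition above) =====
theorem generate_slices_spec : Claim_equal_generate_slices := by
  intro w h s o _ _
  unfold Spec_generate_slices
  rw [genA_eq]
  have key := outer_loop ((PySem.List.pyRange 0 w (s - o)).map (fun x0 => (max 0 (min (x0 + s) w - s), min (x0 + s) w)))
      ((PySem.List.pyRange 0 h (s - o)).map (fun y0 => (max 0 (min (y0 + s) h - s), min (y0 + s) h))) []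
  simp only [List.flatMap_nil] at key
  rw [key]
  simp only [generate_slices_alt, PySem.List.dedup_eq_ofList]
  rw [PySem.Set.ofList_eq_foldl ((PySem.List.pyRange 0 h (s - o)).map (fun y0 => (max 0 (min (y0 + s) h - s), min (y0 + s) h)))]
  rfl
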